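-- pv_equiv track=rewrite | github.com/lee101/cutedsl | examples/multivariate_pair_eval.py | build_partner_sets
-- ===== SOURCE A (Python) =====
-- import itertools
--
-- def build_partner_sets(target_symbol: str, partner_symbols: list[str], partner_pool_sizes: list[int]) -> list[tuple[str, ...]]:
--     deduped = []
--     seen = set()
--     for symbol in partner_symbols:
--         if symbol == target_symbol or symbol in seen:
--             continue
--         deduped.append(symbol)
--         seen.add(symbol)
--
--     partner_sets: list[tuple[str, ...]] = []
--     for pool_size in partner_pool_sizes:
--         if pool_size <= 0:
--             continue
--         for combo in itertools.combinations(deduped, pool_size):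
--             partner_sets.append(combo)
--     return partner_sets
-- ===== SOURCE B (Python) =====
-- def build_partner_sets(target_symbol: str, partner_symbols: list[str], partner_pool_sizes: list[int]) -> list[tuple[str, ...]]:
--     deduped = []
--     seen = set()
--     for symbol in partner_symbols:
--         if symbol == target_symbol or symbol in seen:
--             continue
--         deduped.append(symbol)
--         seen.add(symbol)
--
--     kmax = 0
--     for k in partner_pool_sizes:
--         if k > 0 and k > kmax:
--             kmax = k
--     if kmax > len(deduped):
--         kmax = len(deduped)
--
--     # table[k] = all k-combinations (lexicographic by position) of the suffix of
--     # deduped processed so far; one right-to-left pass fills every level.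
--     table = [[()]] + [[] for _ in range(kmax)]
--     for x in reversed(deduped):
--         for k in range(kmax, 0, -1):
--             table[k] = [(x,) + c for c in table[k - 1]] + table[k]
--
--     partner_sets = []
--     for k in partner_pool_sizes:
--         if 0 < k <= len(deduped):
--             partner_sets.extend(table[k])
--     return partner_sets
-- ===== Notes on version B (the rewrite author's own statement) =====
-- stated objective: alternative
-- what changed: Replaces the per-pool-size itertools.combinations enumeration with one right-to-left Pascal-triangle pass over deduped that builds the combination lists of every needed size simultaneously, then answers each pool size by table lookup.
import Mathlib
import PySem

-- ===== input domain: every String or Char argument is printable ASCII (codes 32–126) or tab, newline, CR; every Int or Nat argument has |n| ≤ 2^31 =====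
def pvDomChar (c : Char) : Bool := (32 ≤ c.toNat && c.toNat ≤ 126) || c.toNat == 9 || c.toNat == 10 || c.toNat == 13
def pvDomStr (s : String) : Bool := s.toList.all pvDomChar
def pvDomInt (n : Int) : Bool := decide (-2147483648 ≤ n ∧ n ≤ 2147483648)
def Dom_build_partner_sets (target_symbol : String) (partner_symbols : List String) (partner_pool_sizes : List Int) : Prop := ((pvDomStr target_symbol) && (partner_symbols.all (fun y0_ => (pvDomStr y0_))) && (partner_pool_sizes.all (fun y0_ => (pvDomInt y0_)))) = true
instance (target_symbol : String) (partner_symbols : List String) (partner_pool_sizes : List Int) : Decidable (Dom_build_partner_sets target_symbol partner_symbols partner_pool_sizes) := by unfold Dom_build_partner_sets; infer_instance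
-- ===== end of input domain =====

-- B replaces the per-size itertools.combinations enumeration by a single right-to-left
-- Pascal-triangle pass that fills all needed combination sizes at once (objective: alternative).

-- ===== PORT A =====
-- pvCombinations xs k = itertools.combinations(xs, k): all k-element subsequences in
-- lexicographic-by-position order ([] when k > len(xs)); library call ported as this function.
def pvCombinations (xs : List String) (k : Nat) : List (List String) :=
  match k, xs with
  | 0, _ => [[]]
  | _+1, [] => []
  | k+1, x :: rest => (pvCombinations rest k).map (fun c => x :: c) ++ pvCombinations rest (k+1)

def build_partner_sets (target_symbol : String) (partner_symbols : List String) (partner_pool_sizes : List Int) : List (List String) :=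
  let dd := partner_symbols.foldl (fun (st : List String × PySem.Set String) symbol =>
      if symbol == target_symbol || st.2.contains symbol then st
      else (st.1 ++ [symbol], st.2.add symbol)) ([], PySem.Set.empty)
  let deduped := dd.1
  partner_pool_sizes.foldl (fun acc pool_size =>
      if pool_size ≤ 0 then acc
      else (pvCombinations deduped pool_size.toNat).foldl (fun a c => a ++ [c]) acc) []

-- ===== PORT B =====
-- the descending in-place k-loop of Source B: level k reads only the not-yet-updated level
-- k-1, so it equals this one-pass rebuild of levels 1..kmax carrying the previous level; exact.
def pvLevels (x : String) (prev : List (List String)) : List (List (List String)) → List (List (List String))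
  | [] => []
  | cur :: rest => ((prev.map (fun c => x :: c)) ++ cur) :: pvLevels x cur rest

def pvStep (x : String) (t : List (List (List String))) : List (List (List String)) :=
  match t with
  | [] => []
  | t0 :: rest => t0 :: pvLevels x t0 rest

def build_partner_sets_alt (target_symbol : String) (partner_symbols : List String) (partner_pool_sizes : List Int) : List (List String) :=
  let dd := partner_symbols.foldl (fun (st : List String × PySem.Set String) symbol =>
      if symbol == target_symbol || st.2.contains symbol then st
      else (st.1 ++ [symbol], st.2.add symbol)) ([], PySem.Set.empty)
  let deduped := dd.1
  let kmax0 := partner_pool_sizes.foldl (fun m k => if 0 < k ∧ m < k then k else m) (0 : Int)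
  let kmax := if kmax0 > (deduped.length : Int) then (deduped.length : Int) else kmax0
  let table := deduped.reverse.foldl (fun t x => pvStep x t) ([[[]]] ++ List.replicate kmax.toNat [])
  -- table[k] is indexed only under 0 < k ≤ len(deduped), where k ≤ kmax is proven; getD is exact there
  partner_pool_sizes.foldl (fun acc k =>
      if 0 < k ∧ k ≤ (deduped.length : Int) then acc ++ table.getD k.toNat [] else acc) []

-- ===== PRECONDITION & SPEC =====
def Spec_build_partner_sets (target_symbol : String) (partner_symbols : List String) (partner_pool_sizes : List Int) (out : List (List String)) : Prop := out = build_partner_sets_alt target_symbol partner_symbols partner_pool_sizes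
instance (target_symbol : String) (partner_symbols : List String) (partner_pool_sizes : List Int) (out : List (List String)) : Decidable (Spec_build_partner_sets target_symbol partner_symbols partner_pool_sizes out) := by unfold Spec_build_partner_sets; infer_instance

-- ===== CLAIM (what is proved, stated in full; the proofs are below) =====
def Claim_equal_build_partner_sets : Prop := ∀ (target_symbol : String) (partner_symbols : List String) (partner_pool_sizes : List Int), Dom_build_partner_sets target_symbol partner_symbols partner_pool_sizes → Spec_build_partner_sets target_symbol partner_symbols partner_pool_sizes (build_partner_sets target_symbol partner_symbols partner_pool_sizes)

-- ===== LEMMAS AND PROOFS =====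

-- combinations of too-short lists are empty
theorem pvCombinations_of_lt {xs : List String} {k : Nat} (h : xs.length < k) :
    pvCombinations xs k = [] := by
  induction xs generalizing k with
  | nil =>
    cases k with
    | zero => omega
    | succ k => rfl
  | cons x rest ih =>
    cases k with
    | zero => simp at h
    | succ k =>
      simp only [pvCombinations]
      rw [ih (by simp at h; omega), ih (by simp at h ⊢; omega)]
      simp

-- the full table of combination levels 0..n
def pvTab (p : List String) (n : Nat) : List (List (List String)) :=
  (List.range (n+1)).map (pvCombinations p)

theorem pvLevels_tab (x : String) (p : List String) :
    ∀ (n j : Nat),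
      pvLevels x (pvCombinations p j) ((List.range' (j+1) n).map (pvCombinations p)) =
      (List.range' (j+1) n).map (pvCombinations (x :: p)) := by
  intro n
  induction n with
  | zero => intro j; simp [pvLevels]
  | succ n ih =>
    intro j
    rw [List.range'_succ]
    simp only [List.map_cons, pvLevels, List.cons.injEq]
    exact ⟨rfl, ih (j+1)⟩

theorem pvStep_tab (x : String) (p : List String) (n : Nat) :
    pvStep x (pvTab p n) = pvTab (x :: p) n := by
  unfold pvTab
  rw [List.range_eq_range', List.range'_succ]
  simp only [List.map_cons, pvStep, List.cons.injEq]
  exact ⟨by cases p <;> rfl, by simpa using pvLevels_tab x p n 0⟩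

theorem pvTab_nil_aux : ∀ (n s : Nat),
    (List.range' (s+1) n).map (pvCombinations []) = List.replicate n [] := by
  intro n
  induction n with
  | zero => intro s; simp
  | succ n ih =>
    intro s
    rw [List.range'_succ]
    simp only [List.map_cons, List.replicate_succ, List.cons.injEq]
    exact ⟨rfl, ih (s+1)⟩

theorem pvTab_nil (n : Nat) : pvTab [] n = [[[]]] ++ List.replicate n [] := by
  unfold pvTab
  rw [List.range_eq_range', List.range'_succ]
  simp only [List.map_cons, List.cons_append, List.nil_append, List.cons.injEq]
  exact ⟨rfl, pvTab_nil_aux n 0⟩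

theorem pvFold_tab (n : Nat) : ∀ (p : List String),
    p.reverse.foldl (fun t x => pvStep x t) (pvTab [] n) = pvTab p n := by
  intro p
  induction p with
  | nil => rfl
  | cons x p ih =>
    rw [List.reverse_cons, List.foldl_append, ih]
    simp only [List.foldl_cons, List.foldl_nil]
    exact pvStep_tab x p n

theorem pvTab_getD (p : List String) {n j : Nat} (h : j ≤ n) :
    (pvTab p n).getD j [] = pvCombinations p j := by
  unfold pvTab
  rw [List.getD_eq_getElem?_getD, List.getElem?_map, List.getElem?_range (by omega : j < n+1)]
  rfl

theorem pvFoldl_snoc (l : List (List String)) : ∀ (acc : List (List String)),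
    l.foldl (fun a c => a ++ [c]) acc = acc ++ l := by
  induction l with
  | nil => simp
  | cons c l ih => intro acc; rw [List.foldl_cons, ih]; simp

-- kmax0 fold: monotone, and every positive member is below the result
theorem pvKfold_mono : ∀ (l : List Int) (m : Int),
    m ≤ l.foldl (fun m k => if 0 < k ∧ m < k then k else m) m := by
  intro l
  induction l with
  | nil => intro m; simp
  | cons k l ih =>
    intro m
    rw [List.foldl_cons]
    refine le_trans ?_ (ih _)
    split_ifs with h
    · omega
    · omega

theorem pvKfold_mem : ∀ (l : List Int) (m k : Int), k ∈ l → 0 < k →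
    k ≤ l.foldl (fun m k => if 0 < k ∧ m < k then k else m) m := by
  intro l
  induction l with
  | nil => intro m k hk; simp at hk
  | cons a l ih =>
    intro m k hk hpos
    rw [List.foldl_cons]
    rcases List.mem_cons.mp hk with h | h
    · subst h
      refine le_trans ?_ (pvKfold_mono l _)
      split_ifs with h
      · omega
      · omega
    · exact ih _ k h hpos

-- per-element agreement of the two output folds
theorem pvOut_eq (d : List String) (n : Nat) (table : List (List (List String)))
    (htab : ∀ j, j ≤ n → table.getD j [] = pvCombinations d j) :
    ∀ (l : List Int) (acc : List (List String)),
      (∀ k, k ∈ l → 0 < k → k ≤ (d.length : Int) → k.toNat ≤ n) →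
      l.foldl (fun acc pool_size =>
          if pool_size ≤ 0 then acc
          else (pvCombinations d pool_size.toNat).foldl (fun a c => a ++ [c]) acc) acc =
      l.foldl (fun acc k =>
          if 0 < k ∧ k ≤ (d.length : Int) then acc ++ table.getD k.toNat [] else acc) acc := by
  intro l
  induction l with
  | nil => intro acc _; rfl
  | cons k l ih =>
    intro acc hb
    rw [List.foldl_cons, List.foldl_cons]
    have hrest : ∀ k', k' ∈ l → 0 < k' → k' ≤ (d.length : Int) → k'.toNat ≤ n :=
      fun k' h => hb k' (List.mem_cons_of_mem _ h)
    by_cases hk : k ≤ 0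
    · rw [if_pos hk, if_neg (by omega)]
      exact ih _ hrest
    · rw [if_neg hk]
      by_cases hlen : k ≤ (d.length : Int)
      · rw [if_pos ⟨by omega, hlen⟩, pvFoldl_snoc,
          htab k.toNat (hb k List.mem_cons_self (by omega) hlen)]
        exact ih _ hrest
      · rw [if_neg (by omega), pvFoldl_snoc,
          pvCombinations_of_lt (by omega : d.length < k.toNat), List.append_nil]
        exact ih _ hrest

-- ===== VERDICT (by name: the statement is the Claim_ definition above) =====
theorem build_partner_sets_spec : Claim_equal_build_partner_sets := by
  intro target_symbol partner_symbols partner_pool_sizes _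
  unfold Spec_build_partner_sets build_partner_sets build_partner_sets_alt
  simp only []
  set d := (partner_symbols.foldl (fun (st : List String × PySem.Set String) symbol =>
      if symbol == target_symbol || st.2.contains symbol then st
      else (st.1 ++ [symbol], st.2.add symbol)) ([], PySem.Set.empty)).1 with hd
  set kmax0 := partner_pool_sizes.foldl (fun m k => if 0 < k ∧ m < k then k else m) (0 : Int) with hkm
  set kmax := if kmax0 > (d.length : Int) then (d.length : Int) else kmax0 with hkmax
  have hkm0 : (0 : Int) ≤ kmax0 := pvKfold_mono partner_pool_sizes 0
  have htable : d.reverse.foldl (fun t x => pvStep x t) ([[[]]] ++ List.replicate kmax.toNat []) =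
      pvTab d kmax.toNat := by
    rw [← pvTab_nil]; exact pvFold_tab kmax.toNat d
  rw [htable]
  refine pvOut_eq d kmax.toNat (pvTab d kmax.toNat) (fun j hj => pvTab_getD d hj)
    partner_pool_sizes [] ?_
  intro k hk hpos hlen
  have h1 : k ≤ kmax0 := pvKfold_mem partner_pool_sizes 0 k hk hpos
  have h2 : k ≤ kmax := by rw [hkmax]; split_ifs with h <;> omega
  omega
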